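-- pv_equiv track=rewrite | github.com/martinrulez/territory-czechia-events | scoring/competitors.py | _infer_segment_from_products
-- ===== SOURCE A (Python) =====
-- AEC_PRODUCTS = {"Revit", "Civil 3D", "Navisworks", "Advance Steel",
--                 "InfraWorks", "Forma", "BIM Collaborate", "BIM Collaborate Pro",
--                 "ACC Docs", "ACC Build", "Fabrication CAMduct", "AEC Collection",
--                 "AutoCAD Architecture", "AutoCAD MEP", "AutoCAD Map 3D"}
--
-- DM_PRODUCTS = {"Inventor", "Fusion", "PowerMill", "PowerInspect", "FeatureCAM",
--                "Moldflow", "Netfabb", "Vault", "VRED", "Alias", "PDMC",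
--                "AutoCAD Mechanical", "AutoCAD Electrical", "AutoCAD Plant 3D",
--                "Fusion + PowerMill", "Fusion + PowerShape", "Fusion + PowerInspect",
--                "Fusion + FeatureCAM", "Fusion + Netfabb", "Fusion + EAGLE",
--                "Fusion Mfg Ext", "Fusion Sim Ext", "Fusion Manage"}
--
-- ME_PRODUCTS = {"Maya", "3ds Max", "Arnold", "Flame", "Smoke",
--                "MotionBuilder", "M&E Collection", "Flow Production Tracking"}
--
-- def _infer_segment_from_products(normalized: list) -> str:
--     """Infer the most likely Autodesk segment from the products a company owns."""
--     normalized_lower = {p.lower() for p in normalized}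
--     aec_count = len(normalized_lower & {p.lower() for p in AEC_PRODUCTS})
--     dm_count = len(normalized_lower & {p.lower() for p in DM_PRODUCTS})
--     me_count = len(normalized_lower & {p.lower() for p in ME_PRODUCTS})
--     if aec_count + dm_count + me_count == 0:
--         return "unknown"
--     best = max([("AEC", aec_count), ("D&M", dm_count), ("M&E", me_count)],
--                key=lambda x: x[1])
--     return best[0] if best[1] > 0 else "unknown"
-- ===== SOURCE B (Python) =====
-- AEC_PRODUCTS = {"Revit", "Civil 3D", "Navisworks", "Advance Steel",
--                 "InfraWorks", "Forma", "BIM Collaborate", "BIM Collaborate Pro",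
--                 "ACC Docs", "ACC Build", "Fabrication CAMduct", "AEC Collection",
--                 "AutoCAD Architecture", "AutoCAD MEP", "AutoCAD Map 3D"}
--
-- DM_PRODUCTS = {"Inventor", "Fusion", "PowerMill", "PowerInspect", "FeatureCAM",
--                "Moldflow", "Netfabb", "Vault", "VRED", "Alias", "PDMC",
--                "AutoCAD Mechanical", "AutoCAD Electrical", "AutoCAD Plant 3D",
--                "Fusion + PowerMill", "Fusion + PowerShape", "Fusion + PowerInspect",
--                "Fusion + FeatureCAM", "Fusion + Netfabb", "Fusion + EAGLE",
--                "Fusion Mfg Ext", "Fusion Sim Ext", "Fusion Manage"}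
--
-- ME_PRODUCTS = {"Maya", "3ds Max", "Arnold", "Flame", "Smoke",
--                "MotionBuilder", "M&E Collection", "Flow Production Tracking"}
--
-- # inverted index: lowercased product name -> segment label (the three sets are disjoint)
-- PRODUCT_TO_SEGMENT = {}
-- for _seg, _products in (("AEC", AEC_PRODUCTS), ("D&M", DM_PRODUCTS), ("M&E", ME_PRODUCTS)):
--     for _p in _products:
--         PRODUCT_TO_SEGMENT[_p.lower()] = _seg
--
--
-- def _infer_segment_from_products(normalized: list) -> str:
--     """Infer the most likely Autodesk segment from the products a company owns."""
--     counts = {"AEC": 0, "D&M": 0, "M&E": 0}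
--     for p in {q.lower() for q in normalized}:
--         seg = PRODUCT_TO_SEGMENT.get(p)
--         if seg is not None:
--             counts[seg] += 1
--     best_label, best = "unknown", 0
--     for label, c in counts.items():
--         if c > best:
--             best_label, best = label, c
--     return best_label
-- ===== Notes on version B (the rewrite author's own statement) =====
-- stated objective: idiomatic
-- what changed: Replaces the three per-segment lowercased-set intersections and the max-over-pairs call by a single precomputed inverted index (lowercased product -> segment) looked up once per deduplicated input product, with counts accumulated in one pass and the best label chosen by a running-max scan in fixed AEC/D&M/M&E order.
import Mathlib
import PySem

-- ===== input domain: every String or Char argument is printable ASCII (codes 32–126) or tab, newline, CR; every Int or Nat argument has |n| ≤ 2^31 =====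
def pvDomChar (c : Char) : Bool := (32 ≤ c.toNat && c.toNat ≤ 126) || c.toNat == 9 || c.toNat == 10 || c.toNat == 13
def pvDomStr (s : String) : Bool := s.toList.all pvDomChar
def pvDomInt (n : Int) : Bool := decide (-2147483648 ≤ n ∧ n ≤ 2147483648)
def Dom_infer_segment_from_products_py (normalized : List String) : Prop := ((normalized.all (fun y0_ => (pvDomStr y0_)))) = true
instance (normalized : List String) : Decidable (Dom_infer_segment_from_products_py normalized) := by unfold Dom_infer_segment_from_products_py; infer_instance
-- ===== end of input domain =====

set_option maxRecDepth 16000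

-- B replaces A's three per-segment set intersections by a single precomputed inverted
-- index (lowercased product -> segment) and one counting pass over the deduplicated
-- input, picking the best label by a running-max scan in fixed order (objective: idiomatic).

-- ===== PORT A =====
-- module-level constants (Python set literals; ported as the list of their distinct
-- elements in source order — only membership/size of these sets is ever used)
def AEC_PRODUCTS : List String :=
  ["Revit", "Civil 3D", "Navisworks", "Advance Steel",
   "InfraWorks", "Forma", "BIM Collaborate", "BIM Collaborate Pro",
   "ACC Docs", "ACC Build", "Fabrication CAMduct", "AEC Collection",
   "AutoCAD Architecture", "AutoCAD MEP", "AutoCAD Map 3D"]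

def DM_PRODUCTS : List String :=
  ["Inventor", "Fusion", "PowerMill", "PowerInspect", "FeatureCAM",
   "Moldflow", "Netfabb", "Vault", "VRED", "Alias", "PDMC",
   "AutoCAD Mechanical", "AutoCAD Electrical", "AutoCAD Plant 3D",
   "Fusion + PowerMill", "Fusion + PowerShape", "Fusion + PowerInspect",
   "Fusion + FeatureCAM", "Fusion + Netfabb", "Fusion + EAGLE",
   "Fusion Mfg Ext", "Fusion Sim Ext", "Fusion Manage"]

def ME_PRODUCTS : List String :=
  ["Maya", "3ds Max", "Arnold", "Flame", "Smoke",
   "MotionBuilder", "M&E Collection", "Flow Production Tracking"]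

def infer_segment_from_products_py (normalized : List String) : String :=
  let normalized_lower : PySem.Set String := PySem.Set.ofList (normalized.map (fun p => PySem.Str.lower p))
  let aec_count : Int := PySem.Set.len (PySem.Set.inter normalized_lower (PySem.Set.ofList (AEC_PRODUCTS.map (fun p => PySem.Str.lower p))))
  let dm_count : Int := PySem.Set.len (PySem.Set.inter normalized_lower (PySem.Set.ofList (DM_PRODUCTS.map (fun p => PySem.Str.lower p))))
  let me_count : Int := PySem.Set.len (PySem.Set.inter normalized_lower (PySem.Set.ofList (ME_PRODUCTS.map (fun p => PySem.Str.lower p))))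
  if aec_count + dm_count + me_count = 0 then "unknown"
  else
    -- max over a nonempty literal list never raises: max? is always some; getD's default is unreachable
    let best := (PySem.List.max? [("AEC", aec_count), ("D&M", dm_count), ("M&E", me_count)] (fun x => x.2)).getD ("unknown", 0)
    if best.2 > 0 then best.1 else "unknown"

-- ===== PORT B =====
-- inverted index: lowercased product name -> segment label (module-level loop in Source B;
-- iteration order over the Python sets is irrelevant: the dict is only looked up)
def PRODUCT_TO_SEGMENT : PySem.Dict String String :=
  [("AEC", AEC_PRODUCTS), ("D&M", DM_PRODUCTS), ("M&E", ME_PRODUCTS)].foldl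
    (fun d pr => pr.2.foldl (fun d p => d.insert (PySem.Str.lower p) pr.1) d) PySem.Dict.empty

def infer_segment_from_products_py_alt (normalized : List String) : String :=
  let counts0 : PySem.Dict String Int := PySem.Dict.ofList [("AEC", 0), ("D&M", 0), ("M&E", 0)]
  -- loop over the deduplicated lowered inputs; counts are order-independent
  let counts := (PySem.Set.ofList (normalized.map (fun q => PySem.Str.lower q))).foldl
    (fun d p => match PRODUCT_TO_SEGMENT.get? p with
      | some seg => d.modify seg 0 (· + 1)
      | none => d) counts0
  let best := counts.items.foldl (fun b it => if it.2 > b.2 then it else b) ("unknown", (0 : Int))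
  best.1

-- ===== PRECONDITION & SPEC =====
def Spec_infer_segment_from_products_py (normalized : List String) (out : String) : Prop := out = infer_segment_from_products_py_alt normalized
instance (normalized : List String) (out : String) : Decidable (Spec_infer_segment_from_products_py normalized out) := by unfold Spec_infer_segment_from_products_py; infer_instance

-- ===== CLAIM (what is proved, stated in full; the proofs are below) =====
def Claim_equal_infer_segment_from_products_py : Prop := ∀ (normalized : List String), Dom_infer_segment_from_products_py normalized → Spec_infer_segment_from_products_py normalized (infer_segment_from_products_py normalized)

-- ===== LEMMAS AND PROOFS =====

def lowA : List String := AEC_PRODUCTS.map (fun p => PySem.Str.lower p)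
def lowD : List String := DM_PRODUCTS.map (fun p => PySem.Str.lower p)
def lowM : List String := ME_PRODUCTS.map (fun p => PySem.Str.lower p)

-- lookup after one block of inserts with a constant value
theorem get?_block (l : List String) (seg : String) (d : PySem.Dict String String) (p : String) :
    (l.foldl (fun d x => d.insert (PySem.Str.lower x) seg) d).get? p =
      if p ∈ l.map (fun x => PySem.Str.lower x) then some seg else d.get? p := by
  induction l generalizing d with
  | nil => simp
  | cons x t ih =>
    simp only [List.foldl_cons, List.map_cons, List.mem_cons, ih]
    by_cases h : p ∈ t.map (fun x => PySem.Str.lower x)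
    · simp [h]
    · by_cases he : p = PySem.Str.lower x
      · simp [he]
      · simp [h, he, PySem.Dict.get?_insert]

theorem classify (p : String) :
    PRODUCT_TO_SEGMENT.get? p =
      if p ∈ lowM then some "M&E" else if p ∈ lowD then some "D&M"
      else if p ∈ lowA then some "AEC" else none := by
  unfold PRODUCT_TO_SEGMENT
  simp only [List.foldl_cons, List.foldl_nil]
  rw [get?_block, get?_block, get?_block]
  simp [PySem.Dict.get?_empty, lowA, lowD, lowM]

theorem disjA : ∀ p ∈ lowA, p ∉ lowD ∧ p ∉ lowM := by decide
theorem disjD : ∀ p ∈ lowD, p ∉ lowA ∧ p ∉ lowM := by decide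
theorem disjM : ∀ p ∈ lowM, p ∉ lowA ∧ p ∉ lowD := by decide

theorem filt_aec (p : String) :
    (PRODUCT_TO_SEGMENT.get? p == some "AEC") = PySem.Set.contains (PySem.Set.ofList lowA) p := by
  rw [classify]
  by_cases h1 : p ∈ lowM
  · have := (disjM p h1).1
    simp_all [PySem.Set.mem_ofList]
  · by_cases h2 : p ∈ lowD
    · have := (disjD p h2).1
      simp_all [PySem.Set.mem_ofList]
    · by_cases h3 : p ∈ lowA <;> simp_all [PySem.Set.mem_ofList]

theorem filt_dm (p : String) :
    (PRODUCT_TO_SEGMENT.get? p == some "D&M") = PySem.Set.contains (PySem.Set.ofList lowD) p := by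
  rw [classify]
  by_cases h1 : p ∈ lowM
  · have := (disjM p h1).2
    simp_all [PySem.Set.mem_ofList]
  · by_cases h2 : p ∈ lowD
    · simp_all [PySem.Set.mem_ofList]
    · by_cases h3 : p ∈ lowA <;> simp_all [PySem.Set.mem_ofList]

theorem filt_me (p : String) :
    (PRODUCT_TO_SEGMENT.get? p == some "M&E") = PySem.Set.contains (PySem.Set.ofList lowM) p := by
  rw [classify]
  by_cases h1 : p ∈ lowM
  · simp_all [PySem.Set.mem_ofList]
  · by_cases h2 : p ∈ lowD
    · have := (disjD p h2).2
      simp_all [PySem.Set.mem_ofList]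
    · by_cases h3 : p ∈ lowA
      · have := (disjA p h3).2
        simp_all [PySem.Set.mem_ofList]
      · simp_all [PySem.Set.mem_ofList]

def pvStep (d : PySem.Dict String Int) (p : String) : PySem.Dict String Int :=
  match PRODUCT_TO_SEGMENT.get? p with
  | some seg => d.modify seg 0 (· + 1)
  | none => d

theorem counts_fold (l : List String) (d : PySem.Dict String Int) (lab : String) :
    (l.foldl pvStep d).getD lab 0 =
      d.getD lab 0 + ((l.filter (fun p => PRODUCT_TO_SEGMENT.get? p == some lab)).length : Int) := by
  induction l generalizing d with
  | nil => simp
  | cons x t ih =>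
    simp only [List.foldl_cons, List.filter_cons]
    rcases h : PRODUCT_TO_SEGMENT.get? x with _ | seg
    · simp only [pvStep, h, ih]
      simp
    · simp only [pvStep, h, ih]
      by_cases he : seg = lab
      · subst he
        simp only [PySem.Dict.getD_modify, beq_self_eq_true, if_true, List.length_cons]
        omega
      · have hb : (PRODUCT_TO_SEGMENT.get? x == some lab) = false := by simp [h, he]
        have hne : lab ≠ seg := fun hh => he hh.symm
        simp [PySem.Dict.getD_modify, hne, he]

theorem seg_mem (p seg : String) (h : PRODUCT_TO_SEGMENT.get? p = some seg) :
    seg = "AEC" ∨ seg = "D&M" ∨ seg = "M&E" := by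
  rw [classify p] at h
  split_ifs at h <;> simp_all

theorem keys_fold (l : List String) (d : PySem.Dict String Int)
    (hA : "AEC" ∈ d.keys) (hD : "D&M" ∈ d.keys) (hM : "M&E" ∈ d.keys) :
    (l.foldl pvStep d).keys = d.keys := by
  induction l generalizing d with
  | nil => rfl
  | cons x t ih =>
    simp only [List.foldl_cons]
    rcases h : PRODUCT_TO_SEGMENT.get? x with _ | seg
    · simp only [pvStep, h]
      exact ih d hA hD hM
    · have hk : (d.modify seg 0 (· + 1)).keys = d.keys := by
        rw [PySem.Dict.keys_modify, PySem.Dict.keys_insert_of_contains]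
        rw [PySem.Dict.contains_iff_mem_keys]
        rcases seg_mem x seg h with rfl | rfl | rfl <;> assumption
      simp only [pvStep, h]
      rw [ih (d.modify seg 0 (· + 1)) (by rw [hk]; exact hA) (by rw [hk]; exact hD)
            (by rw [hk]; exact hM), hk]

-- the final selection: A's max-over-pairs vs B's running-max scan agree for nonnegative counts
theorem select_eq (a d m : Nat) :
    (if (a : Int) + (d : Int) + (m : Int) = 0 then "unknown"
     else
       let best := (PySem.List.max? [("AEC", (a : Int)), ("D&M", (d : Int)), ("M&E", (m : Int))]
                     (fun x => x.2)).getD ("unknown", 0)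
       if best.2 > 0 then best.1 else "unknown")
    = (([("AEC", (a : Int)), ("D&M", (d : Int)), ("M&E", (m : Int))]).foldl
        (fun b it => if it.2 > b.2 then it else b) ("unknown", (0 : Int))).1 := by
  simp only [PySem.List.max?, List.foldl]
  split_ifs <;> first | rfl | omega |
    (simp_all; all_goals first | omega | (split_ifs <;> first | rfl | omega))

def pvC0 : PySem.Dict String Int := PySem.Dict.ofList [("AEC", 0), ("D&M", 0), ("M&E", 0)]

theorem infer_A_eq_B (normalized : List String) :
    infer_segment_from_products_py normalized = infer_segment_from_products_py_alt normalized := by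
  unfold infer_segment_from_products_py infer_segment_from_products_py_alt
  have hstep : (fun (d : PySem.Dict String Int) p =>
      match PRODUCT_TO_SEGMENT.get? p with
      | some seg => d.modify seg 0 (· + 1)
      | none => d) = pvStep := rfl
  have hc0 : PySem.Dict.ofList [("AEC", (0 : Int)), ("D&M", 0), ("M&E", 0)] = pvC0 := rfl
  simp only [hstep, hc0]
  generalize hSdef : PySem.Set.ofList (normalized.map (fun p => PySem.Str.lower p)) = S
  -- keys of the count dict are unchanged by the counting loop
  have h0 : pvC0.keys = ["AEC", "D&M", "M&E"] := by decide
  have hkeys : (S.foldl pvStep pvC0).keys = ["AEC", "D&M", "M&E"] := by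
    rw [keys_fold S pvC0 (by rw [h0]; decide) (by rw [h0]; decide) (by rw [h0]; decide), h0]
  have hnd : (S.foldl pvStep pvC0).keys.Nodup := by rw [hkeys]; decide
  have hitems : (S.foldl pvStep pvC0).items =
      [("AEC", (S.foldl pvStep pvC0).getD "AEC" 0), ("D&M", (S.foldl pvStep pvC0).getD "D&M" 0),
       ("M&E", (S.foldl pvStep pvC0).getD "M&E" 0)] := by
    rw [PySem.Dict.items_eq_map_keys _ hnd 0, hkeys]; rfl
  have hgA : (S.foldl pvStep pvC0).getD "AEC" 0 =
      ((S.filter (fun p => PRODUCT_TO_SEGMENT.get? p == some "AEC")).length : Int) := by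
    rw [counts_fold]; show (0 : Int) + _ = _; rw [zero_add]
  have hgD : (S.foldl pvStep pvC0).getD "D&M" 0 =
      ((S.filter (fun p => PRODUCT_TO_SEGMENT.get? p == some "D&M")).length : Int) := by
    rw [counts_fold]; show (0 : Int) + _ = _; rw [zero_add]
  have hgM : (S.foldl pvStep pvC0).getD "M&E" 0 =
      ((S.filter (fun p => PRODUCT_TO_SEGMENT.get? p == some "M&E")).length : Int) := by
    rw [counts_fold]; show (0 : Int) + _ = _; rw [zero_add]
  -- A's intersection filters coincide with B's lookup filters
  have hfA : S.filter (fun p => PRODUCT_TO_SEGMENT.get? p == some "AEC")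
      = PySem.Set.inter S (PySem.Set.ofList (AEC_PRODUCTS.map (fun p => PySem.Str.lower p))) := by
    unfold PySem.Set.inter
    exact List.filter_congr (fun p _ => filt_aec p)
  have hfD : S.filter (fun p => PRODUCT_TO_SEGMENT.get? p == some "D&M")
      = PySem.Set.inter S (PySem.Set.ofList (DM_PRODUCTS.map (fun p => PySem.Str.lower p))) := by
    unfold PySem.Set.inter
    exact List.filter_congr (fun p _ => filt_dm p)
  have hfM : S.filter (fun p => PRODUCT_TO_SEGMENT.get? p == some "M&E")
      = PySem.Set.inter S (PySem.Set.ofList (ME_PRODUCTS.map (fun p => PySem.Str.lower p))) := by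
    unfold PySem.Set.inter
    exact List.filter_congr (fun p _ => filt_me p)
  rw [hfA] at hgA
  rw [hfD] at hgD
  rw [hfM] at hgM
  simp only [hitems, hgA, hgD, hgM, PySem.Set.len]
  exact select_eq _ _ _

-- ===== VERDICT (by name: the statement is the Claim_ definition above) =====
theorem infer_segment_from_products_py_spec : Claim_equal_infer_segment_from_products_py := by
  intro normalized _
  exact infer_A_eq_B normalized
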